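-- pv_equiv track=rewrite | github.com/YeonwooSung/ai_book | Experiments/CV/ocr_with_bert/src/modules/corrector.py | _convert_typo_detections
-- ===== SOURCE A (Python) =====
-- from typing import List, Tuple
--
-- def _convert_typo_detections(typo_detections: List[int],
--                              org_words: List[str]
--                              ) -> Tuple[str, List[str]]:
--     masked_text = []
--     ocr_words = []
--     for label, word in zip(typo_detections, org_words):
--         if label == 1:
--             ocr_words.append(word)
--             masked_text.append('[MASK]')
--         else:
--             masked_text.append(word)
--     masked_text = ' '.join(masked_text)
--     return masked_text, ocr_words
-- ===== SOURCE B (Python) =====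
-- from typing import List, Tuple
--
-- def _convert_typo_detections(typo_detections: List[int],
--                              org_words: List[str]
--                              ) -> Tuple[str, List[str]]:
--     # Copy-and-patch: compute the flagged index list once, copy the truncated
--     # word list and overwrite the flagged slots in place.
--     n = min(len(typo_detections), len(org_words))
--     masked = list(org_words[:n])
--     flagged = [i for i in range(n) if typo_detections[i] == 1]
--     ocr_words = [org_words[i] for i in flagged]
--     for i in flagged:
--         masked[i] = '[MASK]'
--     return ' '.join(masked), ocr_words
-- ===== Notes on version B (the rewrite author's own statement) =====
-- stated objective: alternative
-- what changed: Replaced A's single zip loop with two conditional appends by a copy-and-patch scheme: compute the flagged index list once, derive ocr_words from it, and overwrite the flagged slots of a truncated copy of org_words in place.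
import Mathlib
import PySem

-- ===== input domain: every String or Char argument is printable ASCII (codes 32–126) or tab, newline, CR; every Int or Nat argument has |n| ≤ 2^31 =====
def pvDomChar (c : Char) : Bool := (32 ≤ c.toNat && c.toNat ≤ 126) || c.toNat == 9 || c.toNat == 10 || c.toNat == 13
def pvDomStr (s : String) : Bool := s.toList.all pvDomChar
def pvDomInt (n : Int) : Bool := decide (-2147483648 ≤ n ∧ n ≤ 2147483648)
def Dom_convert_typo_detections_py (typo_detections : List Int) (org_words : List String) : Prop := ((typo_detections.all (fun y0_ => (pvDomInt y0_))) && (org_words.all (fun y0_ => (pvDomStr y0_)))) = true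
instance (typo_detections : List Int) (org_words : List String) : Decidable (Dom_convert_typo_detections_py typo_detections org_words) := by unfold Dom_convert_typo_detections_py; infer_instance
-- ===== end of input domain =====

-- B replaces A's single fused zip loop (two conditional accumulators) with a
-- copy-and-patch scheme driven by a precomputed flagged-index list; same value,
-- objective: alternative.

-- ===== PORT A =====
-- A's loop: one pass over zip, appending to two accumulators (masked_text, ocr_words).
def pvLoopA : List (Int × String) → List String → List String → List String × List String
  | [], masked, ocr => (masked, ocr)
  | (label, word) :: rest, masked, ocr =>
      if label == 1 then pvLoopA rest (masked ++ ["[MASK]"]) (ocr ++ [word])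
      else pvLoopA rest (masked ++ [word]) ocr

def convert_typo_detections_py (typo_detections : List Int) (org_words : List String) : String × List String :=
  let (masked, ocr) := pvLoopA (typo_detections.zip org_words) [] []
  (PySem.Str.join " " masked, ocr)

-- ===== PORT B =====
-- Source B: n = min of lengths; masked = copy of org_words[:n]; flagged index list;
-- ocr_words by indexing; then patch masked at each flagged index.
-- Indexing td[i]/ow[i] is ported as getD (exact: every i comes from range n, in range).
def convert_typo_detections_py_alt (typo_detections : List Int) (org_words : List String) : String × List String :=
  let n := min typo_detections.length org_words.length
  let masked0 := org_words.take n
  let flagged := (List.range n).filter (fun i => typo_detections.getD i 0 == 1)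
  let ocr_words := flagged.map (fun i => org_words.getD i "")
  let masked := flagged.foldl (fun m i => m.set i "[MASK]") masked0
  (PySem.Str.join " " masked, ocr_words)

-- ===== PRECONDITION & SPEC =====
def Spec_convert_typo_detections_py (typo_detections : List Int) (org_words : List String) (out : String × List String) : Prop := out = convert_typo_detections_py_alt typo_detections org_words
instance (typo_detections : List Int) (org_words : List String) (out : String × List String) : Decidable (Spec_convert_typo_detections_py typo_detections org_words out) := by unfold Spec_convert_typo_detections_py; infer_instance

-- ===== CLAIM =====
def Claim_equal_convert_typo_detections_py : Prop := ∀ (typo_detections : List Int) (org_words : List String), Dom_convert_typo_detections_py typo_detections org_words → Spec_convert_typo_detections_py typo_detections org_words (convert_typo_detections_py typo_detections org_words)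

-- ===== LEMMAS AND PROOFS =====
theorem pvLoopA_eq (ps : List (Int × String)) (masked ocr : List String) :
    pvLoopA ps masked ocr =
      (masked ++ ps.map (fun p => if p.1 == 1 then "[MASK]" else p.2),
       ocr ++ (ps.filter (fun p => p.1 == 1)).map Prod.snd) := by
  induction ps generalizing masked ocr with
  | nil => simp [pvLoopA]
  | cons p rest ih =>
    obtain ⟨l, w⟩ := p
    by_cases h : l = 1 <;> simp [pvLoopA, h, ih]

-- zip expressed as a map over range (min of lengths)
theorem zip_eq_range_map (td : List Int) (ow : List String) :
    td.zip ow = (List.range (min td.length ow.length)).map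
      (fun i => (td.getD i 0, ow.getD i "")) := by
  apply List.ext_getElem
  · simp
  · intro i h1 h2
    simp only [List.length_zip] at h1
    simp [List.getElem_zip, List.getD_eq_getElem?_getD,
      List.getElem?_eq_getElem (by omega : i < td.length),
      List.getElem?_eq_getElem (by omega : i < ow.length)]

theorem length_foldl_set (is : List Nat) (L : List String) :
    (is.foldl (fun m i => m.set i "[MASK]") L).length = L.length := by
  induction is generalizing L with
  | nil => rfl
  | cons i is ih => simp [List.foldl, ih]

theorem getElem_foldl_set (is : List Nat) (L : List String) (j : Nat) (hj : j < L.length)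
    (hj' : j < (is.foldl (fun m i => m.set i "[MASK]") L).length) :
    (is.foldl (fun m i => m.set i "[MASK]") L)[j] =
      if j ∈ is then "[MASK]" else L[j] := by
  induction is generalizing L with
  | nil => simp
  | cons i is ih =>
    simp only [List.foldl_cons]
    rw [ih (L.set i "[MASK]") (by simpa using hj) (by simpa using hj')]
    by_cases hmem : j ∈ is
    · simp [hmem]
    · by_cases hij : i = j
      · simp [hmem, hij]
      · simp [hmem, List.getElem_set_ne hij]
        intro h
        omega

theorem foldl_set_eq (td : List Int) (ow : List String) :
    (((List.range (min td.length ow.length)).filter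
        (fun i => td.getD i 0 == 1)).foldl (fun m i => m.set i "[MASK]")
        (ow.take (min td.length ow.length))) =
      (List.range (min td.length ow.length)).map
        (fun i => if td.getD i 0 == 1 then "[MASK]" else ow.getD i "") := by
  apply List.ext_getElem
  · simp [length_foldl_set]
  · intro j h1 h2
    rw [getElem_foldl_set _ _ j (by simp [length_foldl_set] at h1 ⊢; omega) h1]
    have hjn : j < min td.length ow.length := by
      simp [length_foldl_set] at h1; omega
    have hjow : j < ow.length := by omega
    simp [List.mem_filter, List.mem_range, hjn, List.getElem_take,
      List.getD_eq_getElem?_getD, List.getElem?_eq_getElem hjow]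

-- ===== VERDICT =====
theorem convert_typo_detections_py_spec : Claim_equal_convert_typo_detections_py := by
  intro td ow _
  show _ = _
  simp only [convert_typo_detections_py, convert_typo_detections_py_alt, pvLoopA_eq,
    List.nil_append, foldl_set_eq, zip_eq_range_map, List.filter_map, List.map_map]
  rfl
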